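-- pv_equiv track=rewrite | github.com/miRTop/mirtop | scripts/make_spikeins.py | _update_ends
-- ===== SOURCE A (Python) =====
-- def _update_ends(source):
--     nts = ["A", "T", "C", "G"]
--     start_idx = 0
--     end_idx = 0
--     for name in source:
--         source[name] = nts[start_idx] + source[name] + nts[end_idx]
--         if end_idx == 3 and start_idx == 3:
--             end_idx = -1
--             start_idx = 0
--         if end_idx == 3:
--             start_idx += 1
--             end_idx = 0
--         end_idx += 1
--     return source
-- ===== SOURCE B (Python) =====
-- def _update_ends(source):
--     pairs = [("A", "A"), ("A", "T"), ("A", "C"), ("A", "G"),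
--              ("T", "T"), ("T", "C"), ("T", "G"),
--              ("C", "T"), ("C", "C"), ("C", "G"),
--              ("G", "T"), ("G", "C"), ("G", "G")]
--     return {name: pairs[i % len(pairs)][0] + seq + pairs[i % len(pairs)][1]
--             for i, (name, seq) in enumerate(source.items())}
-- ===== Notes on version B (the rewrite author's own statement) =====
-- stated objective: simpler
-- what changed: Replaces the two mutable nucleotide counters with their reset/carry logic by a fixed 13-entry (prefix, suffix) table indexed by position mod 13, built as a dict comprehension.
import Mathlib
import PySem

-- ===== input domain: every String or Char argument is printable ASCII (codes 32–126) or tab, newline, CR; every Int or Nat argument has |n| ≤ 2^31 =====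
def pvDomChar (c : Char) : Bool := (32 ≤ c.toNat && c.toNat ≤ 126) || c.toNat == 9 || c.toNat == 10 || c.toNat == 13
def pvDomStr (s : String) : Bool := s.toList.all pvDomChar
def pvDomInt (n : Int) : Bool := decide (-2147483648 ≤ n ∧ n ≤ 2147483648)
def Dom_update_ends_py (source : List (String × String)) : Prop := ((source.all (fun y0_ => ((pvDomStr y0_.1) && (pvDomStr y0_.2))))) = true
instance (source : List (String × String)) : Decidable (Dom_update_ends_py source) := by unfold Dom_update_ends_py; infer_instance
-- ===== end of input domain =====

-- B replaces A's two mutable counters and reset logic by a fixed 13-entry (prefix,suffix)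
-- table indexed by position mod 13 (simpler). A mutates its dict in place, B builds a new
-- dict; the equivalence proved here is about the return value only.

-- ===== PORT A =====
-- A's loop: per dict entry, wrap the value with nts[start_idx]/nts[end_idx] and update the
-- two counters; carried as structural recursion over the entries with state (start_idx, end_idx).
def updateEndsLoopA : List (String × String) → Int → Int → List (String × String)
  | [], _, _ => []
  | (name, v) :: rest, start_idx, end_idx =>
    let nts : List String := ["A", "T", "C", "G"]
    -- nts[start_idx], nts[end_idx]: indices are always 0..3 here, default never used
    let v' := PySem.List.pyGetD nts start_idx "" ++ v ++ PySem.List.pyGetD nts end_idx ""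
    let p1 : Int × Int := if end_idx = 3 ∧ start_idx = 3 then (0, -1) else (start_idx, end_idx)
    let p2 : Int × Int := if p1.2 = 3 then (p1.1 + 1, 0) else p1
    (name, v') :: updateEndsLoopA rest p2.1 (p2.2 + 1)

def update_ends_py (source : List (String × String)) : List (String × String) :=
  updateEndsLoopA source 0 0

-- ===== PORT B =====
def pairsB : List (String × String) :=
  [("A", "A"), ("A", "T"), ("A", "C"), ("A", "G"),
   ("T", "T"), ("T", "C"), ("T", "G"),
   ("C", "T"), ("C", "C"), ("C", "G"),
   ("G", "T"), ("G", "C"), ("G", "G")]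

def update_ends_py_alt (source : List (String × String)) : List (String × String) :=
  (PySem.List.enumerate source).map (fun p =>
    let ps := PySem.List.pyGetD pairsB (PySem.Int.mod p.1 13) ("", "")
    (p.2.1, ps.1 ++ p.2.2 ++ ps.2))

-- ===== PRECONDITION & SPEC =====
def Spec_update_ends_py (source : List (String × String)) (out : List (String × String)) : Prop := out = update_ends_py_alt source
instance (source : List (String × String)) (out : List (String × String)) : Decidable (Spec_update_ends_py source out) := by unfold Spec_update_ends_py; infer_instance

-- ===== CLAIM (what is proved, stated in full; the proofs are below) =====
def Claim_equal_update_ends_py : Prop := ∀ (source : List (String × String)), Dom_update_ends_py source → Spec_update_ends_py source (update_ends_py source)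

-- ===== LEMMAS AND PROOFS =====
-- the (start_idx, end_idx) state A's counters hold before processing entry number i
def stateA (r : Nat) : Int × Int :=
  [((0:Int), (0:Int)), (0, 1), (0, 2), (0, 3), (1, 1), (1, 2), (1, 3),
   (2, 1), (2, 2), (2, 3), (3, 1), (3, 2), (3, 3)].getD r (0, 0)

lemma upA_eq (l : List (String × String)) : ∀ i : Nat,
    updateEndsLoopA l (stateA (i % 13)).1 (stateA (i % 13)).2 =
      (PySem.List.enumerate l (i : Int)).map (fun p =>
        let ps := PySem.List.pyGetD pairsB (PySem.Int.mod p.1 13) ("", "")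
        (p.2.1, ps.1 ++ p.2.2 ++ ps.2)) := by
  induction l with
  | nil => intro i; rfl
  | cons hd tl ih =>
    intro i
    obtain ⟨name, v⟩ := hd
    have hm : i % 13 < 13 := Nat.mod_lt _ (by decide)
    have hmod : PySem.Int.mod (i : Int) 13 = ((i % 13 : Nat) : Int) := by
      simpa using PySem.Int.mod_natCast i 13
    have hstep : (i + 1) % 13 = (i % 13 + 1) % 13 := by omega
    have ihs := ih (i + 1)
    rw [hstep] at ihs
    rw [PySem.List.enumerate_cons]
    generalize hr : i % 13 = r at *
    interval_cases r <;>
      simp only [updateEndsLoopA, stateA, List.map_cons, hmod] <;>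
      refine congrArg₂ _ (by rfl) ?_ <;>
      · rw [show ((i : Int) + 1) = ((i + 1 : Nat) : Int) by push_cast; ring]
        simpa using ihs

-- ===== VERDICT (by name: the statement is the Claim_ definition above) =====
theorem update_ends_py_spec : Claim_equal_update_ends_py := by
  intro source _
  unfold Spec_update_ends_py update_ends_py update_ends_py_alt
  simpa using upA_eq source 0
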